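-- pv_equiv track=rewrite | github.com/adud/info | info-pour-tous/labyrinthe/labyrinthe.py | revdup
-- ===== SOURCE A (Python) =====
-- def creer_pile(c):
--     return[]
--
-- def depiler(p):
--     assert len(p) > 0
--     return p.pop()
--
-- def empiler(p, v):
--     p.append(v)
--
-- def taille(p):
--     return len(p)
--
-- def revdup(p):
--     """prend en argument la pile p retourne une pile contenant
--     p retournee sans modifier p"""
--     n = taille(p)
--     s,t = creer_pile(n),creer_pile(n)
--     for i in range(n):
--         v = depiler(p)
--         empiler(s,v)
--         empiler(t,v)
--     for j in range(n):
--         empiler(p,depiler(s))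
--     return t
-- ===== SOURCE B (Python) =====
-- def revdup(p):
--     """prend en argument la pile p retourne une pile contenant
--     p retournee sans modifier p"""
--     return list(reversed(p))
-- ===== Notes on version B (the rewrite author's own statement) =====
-- stated objective: simpler
-- what changed: Replaces the two auxiliary stacks, the pop-everything loop and the restore loop with a single non-mutating list(reversed(p)); B also never mutates p (A mutates it temporarily but restores it, so callers see the same state).
import Mathlib
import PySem

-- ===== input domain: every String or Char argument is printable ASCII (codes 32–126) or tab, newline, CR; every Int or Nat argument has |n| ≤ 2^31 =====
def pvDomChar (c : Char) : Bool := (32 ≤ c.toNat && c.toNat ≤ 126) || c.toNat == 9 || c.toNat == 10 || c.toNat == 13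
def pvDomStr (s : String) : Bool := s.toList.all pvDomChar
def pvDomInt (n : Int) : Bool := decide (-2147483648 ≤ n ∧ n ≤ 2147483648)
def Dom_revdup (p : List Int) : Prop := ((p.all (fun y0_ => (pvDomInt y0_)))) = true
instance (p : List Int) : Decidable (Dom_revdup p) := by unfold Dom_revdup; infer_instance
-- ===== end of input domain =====

-- B never mutates p; A pops everything from p and pushes it back, so the caller
-- observes the same final state of p — equivalence here is about the return value.

-- ===== PORT A =====
-- first loop: for i in range(n): v = p.pop(); s.append(v); t.append(v)
-- (the assert len(p) > 0 always holds since n = len(p); p.pop() takes the last element)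
def revdupLoop1 : Nat → List Int → List Int → List Int → List Int × List Int × List Int
  | 0, p, s, t => (p, s, t)
  | Nat.succ k, p, s, t =>
      let v := p.getLast!
      revdupLoop1 k p.dropLast (s ++ [v]) (t ++ [v])

-- second loop: for j in range(n): p.append(s.pop())
def revdupLoop2 : Nat → List Int → List Int → List Int × List Int
  | 0, p, s => (p, s)
  | Nat.succ k, p, s => revdupLoop2 k (p ++ [s.getLast!]) s.dropLast

def revdup (p : List Int) : List Int :=
  let n := p.length
  let r := revdupLoop1 n p [] []
  let _ := revdupLoop2 n r.1 r.2.1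
  r.2.2

-- ===== PORT B =====
-- list(reversed(p))
def revdup_alt (p : List Int) : List Int := p.reverse

-- ===== PRECONDITION & SPEC =====
def Spec_revdup (p : List Int) (out : List Int) : Prop := out = revdup_alt p
instance (p : List Int) (out : List Int) : Decidable (Spec_revdup p out) := by unfold Spec_revdup; infer_instance

-- ===== CLAIM (what is proved, stated in full; the proofs are below) =====
def Claim_equal_revdup : Prop := ∀ (p : List Int), Dom_revdup p → Spec_revdup p (revdup p)

-- ===== LEMMAS AND PROOFS =====
theorem revdupLoop1_eq (p : List Int) : ∀ s t : List Int,
    revdupLoop1 p.length p s t = ([], s ++ p.reverse, t ++ p.reverse) := by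
  induction p using List.reverseRecOn with
  | nil => intro s t; simp [revdupLoop1]
  | append_singleton q a ih =>
      intro s t
      have h : (q ++ [a]).length = q.length + 1 := by simp
      rw [h]
      have hg : (q ++ [a]).getLast! = a := by
        cases q with
        | nil => rfl
        | cons x xs => simp [List.getLast!]
      simp only [revdupLoop1, hg, List.dropLast_concat, ih]
      simp

-- ===== VERDICT (by name: the statement is the Claim_ definition above) =====
theorem revdup_spec : Claim_equal_revdup := by
  intro p _
  unfold Spec_revdup revdup revdup_alt
  simp [revdupLoop1_eq]
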